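-- pv_equiv track=rewrite | github.com/benwatson528/advent-of-code-20 | main/day24/lobby_layout.py | solve_place_tiles
-- ===== SOURCE A (Python) =====
-- from dataclasses import dataclass
-- from typing import List, Set
--
-- @dataclass(frozen=True)
-- class Coord:
--     x: int
--     y: int
--
-- def solve_place_tiles(tiles: List[List[str]]) -> Set[Coord]:
--     flipped_tiles = set()
--     for tile in tiles:
--         coord = Coord(0, 0)
--         for movement in tile:
--             coord = move(coord, movement)
--         update_tiles(coord, flipped_tiles)
--     return flipped_tiles
--
-- def move(coord: Coord, movement: str) -> Coord:
--     if movement == "se":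
--         coord = Coord(coord.x, coord.y + 1)
--     elif movement == "sw":
--         coord = Coord(coord.x - 1, coord.y + 1)
--     elif movement == "nw":
--         coord = Coord(coord.x, coord.y - 1)
--     elif movement == "ne":
--         coord = Coord(coord.x + 1, coord.y - 1)
--     elif movement == "e":
--         coord = Coord(coord.x + 1, coord.y)
--     elif movement == "w":
--         coord = Coord(coord.x - 1, coord.y)
--     return coord
--
-- def update_tiles(coord: Coord, flipped_tiles: Set[Coord]):
--     if coord in flipped_tiles:
--         flipped_tiles.remove(coord)
--     else:
--         flipped_tiles.add(coord)
-- ===== SOURCE B (Python) =====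
-- from dataclasses import dataclass
-- from typing import List, Set
--
-- @dataclass(frozen=True)
-- class Coord:
--     x: int
--     y: int
--
-- def solve_place_tiles(tiles: List[List[str]]) -> Set[Coord]:
--     flipped_tiles = set()
--     for tile in tiles:
--         # closed form: the final coordinate depends only on how often each
--         # of the six movement tokens occurs, not on their order
--         x = tile.count("e") + tile.count("ne") - tile.count("w") - tile.count("sw")
--         y = tile.count("se") + tile.count("sw") - tile.count("nw") - tile.count("ne")
--         flipped_tiles ^= {Coord(x, y)}
--     return flipped_tiles
-- ===== Notes on version B (the rewrite author's own statement) =====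
-- stated objective: idiomatic
-- what changed: The per-tile fold over movement tokens with a six-way branch is replaced by a closed form from the six token counts, and the add/remove membership toggle is replaced by a symmetric-difference update on the set.
import Mathlib
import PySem

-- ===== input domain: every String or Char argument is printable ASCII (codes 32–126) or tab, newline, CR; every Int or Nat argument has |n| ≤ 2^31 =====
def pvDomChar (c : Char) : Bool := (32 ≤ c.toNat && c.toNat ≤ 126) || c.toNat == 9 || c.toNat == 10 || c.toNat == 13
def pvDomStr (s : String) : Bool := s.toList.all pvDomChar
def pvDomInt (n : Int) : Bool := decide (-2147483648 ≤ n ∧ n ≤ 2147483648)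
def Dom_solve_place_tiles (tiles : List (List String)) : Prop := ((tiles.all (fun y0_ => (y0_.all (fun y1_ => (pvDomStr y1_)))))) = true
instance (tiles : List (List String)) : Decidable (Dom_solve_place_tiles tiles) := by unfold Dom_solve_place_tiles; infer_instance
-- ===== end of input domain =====

-- B replaces the per-tile fold over movements (six-way branch per step) by a closed form from
-- the six token counts, and toggles membership with a symmetric difference (idiomatic rewrite).

-- ===== PORT A =====
def pvMove (coord : Int × Int) (movement : String) : Int × Int :=
  if movement = "se" then (coord.1, coord.2 + 1)
  else if movement = "sw" then (coord.1 - 1, coord.2 + 1)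
  else if movement = "nw" then (coord.1, coord.2 - 1)
  else if movement = "ne" then (coord.1 + 1, coord.2 - 1)
  else if movement = "e" then (coord.1 + 1, coord.2)
  else if movement = "w" then (coord.1 - 1, coord.2)
  else coord

-- Python's set.remove is exact as PySem.Set.discard here: it runs only under the membership guard
def pvUpdateTiles (coord : Int × Int) (flipped_tiles : PySem.Set (Int × Int)) : PySem.Set (Int × Int) :=
  if PySem.Set.contains flipped_tiles coord then PySem.Set.discard flipped_tiles coord
  else PySem.Set.add flipped_tiles coord

def solve_place_tiles (tiles : List (List String)) : List (Int × Int) :=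
  tiles.foldl (fun flipped_tiles tile =>
    pvUpdateTiles (tile.foldl pvMove (0, 0)) flipped_tiles) PySem.Set.empty

-- ===== PORT B =====
def solve_place_tiles_alt (tiles : List (List String)) : List (Int × Int) :=
  tiles.foldl (fun flipped_tiles tile =>
    let x : Int := (PySem.List.count tile "e" : Int) + (PySem.List.count tile "ne" : Int)
      - (PySem.List.count tile "w" : Int) - (PySem.List.count tile "sw" : Int)
    let y : Int := (PySem.List.count tile "se" : Int) + (PySem.List.count tile "sw" : Int)
      - (PySem.List.count tile "nw" : Int) - (PySem.List.count tile "ne" : Int)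
    PySem.Set.symmDiff flipped_tiles (PySem.Set.ofList [(x, y)])) PySem.Set.empty

-- ===== PRECONDITION & SPEC =====
def Spec_solve_place_tiles (tiles : List (List String)) (out : List (Int × Int)) : Prop := out = solve_place_tiles_alt tiles
instance (tiles : List (List String)) (out : List (Int × Int)) : Decidable (Spec_solve_place_tiles tiles out) := by unfold Spec_solve_place_tiles; infer_instance

-- ===== CLAIM (what is proved, stated in full; the proofs are below) =====
def Claim_equal_solve_place_tiles : Prop := ∀ (tiles : List (List String)), Dom_solve_place_tiles tiles → Spec_solve_place_tiles tiles (solve_place_tiles tiles)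

-- ===== LEMMAS AND PROOFS =====

-- the fold of pvMove only shifts the start by the per-token count deltas
theorem foldl_pvMove_counts (tile : List String) (a b : Int) :
    tile.foldl pvMove (a, b) =
      (a + (PySem.List.count tile "e" : Int) + (PySem.List.count tile "ne" : Int)
         - (PySem.List.count tile "w" : Int) - (PySem.List.count tile "sw" : Int),
       b + (PySem.List.count tile "se" : Int) + (PySem.List.count tile "sw" : Int)
         - (PySem.List.count tile "nw" : Int) - (PySem.List.count tile "ne" : Int)) := by
  induction tile generalizing a b with
  | nil => simp [PySem.List.count]
  | cons m tile ih =>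
    simp only [List.foldl_cons, pvMove]
    split_ifs <;>
      rw [ih] <;>
      simp_all [PySem.List.count, List.count_cons, beq_iff_eq, Prod.ext_iff] <;>
      push_cast <;>
      omega

-- the membership toggle is exactly the symmetric difference with the singleton
theorem toggle_eq_symmDiff (s : PySem.Set (Int × Int)) (c : Int × Int) :
    pvUpdateTiles c s = PySem.Set.symmDiff s (PySem.Set.ofList [c]) := by
  by_cases h : c ∈ s
  · simp only [pvUpdateTiles, PySem.Set.symmDiff, PySem.Set.diff, PySem.Set.discard,
      PySem.Set.ofList, PySem.Set.add, PySem.Set.contains, PySem.Set.empty, List.foldl]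
    simp [h]
    apply List.filter_congr
    intro x _
    simp [beq_eq_decide, eq_comm]
  · simp only [pvUpdateTiles, PySem.Set.symmDiff, PySem.Set.diff, PySem.Set.discard,
      PySem.Set.ofList, PySem.Set.add, PySem.Set.contains, PySem.Set.empty, List.foldl]
    simp [h]
    rw [List.filter_eq_self.2]
    intro x hx
    simp
    exact fun e => h (e ▸ hx)

-- ===== VERDICT (by name: the statement is the Claim_ definition above) =====
theorem solve_place_tiles_spec : Claim_equal_solve_place_tiles := by
  intro tiles _
  unfold Spec_solve_place_tiles solve_place_tiles solve_place_tiles_alt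
  have hstep : (fun (flipped_tiles : PySem.Set (Int × Int)) (tile : List String) =>
      pvUpdateTiles (tile.foldl pvMove (0, 0)) flipped_tiles) =
      (fun (flipped_tiles : PySem.Set (Int × Int)) (tile : List String) =>
        let x : Int := (PySem.List.count tile "e" : Int) + (PySem.List.count tile "ne" : Int)
          - (PySem.List.count tile "w" : Int) - (PySem.List.count tile "sw" : Int)
        let y : Int := (PySem.List.count tile "se" : Int) + (PySem.List.count tile "sw" : Int)
          - (PySem.List.count tile "nw" : Int) - (PySem.List.count tile "ne" : Int)
        PySem.Set.symmDiff flipped_tiles (PySem.Set.ofList [(x, y)])) := by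
    funext s tile
    rw [foldl_pvMove_counts, toggle_eq_symmDiff]
    norm_num
  rw [hstep]
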